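-- pv_equiv track=rewrite | github.com/oicr-gsi/smmipQCReport | smMIPqcReport.py | get_plates
-- ===== SOURCE A (Python) =====
-- def get_plates(samples_plates, D, project):
--     '''
--     (dict, dict, str) -> list
--
--     Return a list of plates with samples of interest
--
--     Parameters
--     ----------
--     - samples_plates (dict): Dictionary with plate and well location
--     - D (str): Dictionary with QC metrics for each sample
--     - project (str): Name of the project. Expected in the sample name.
--                      None if all samples from all projects are processed together
--     '''
--
--     # make a list of plates
--     plates = sorted(list(set([samples_plates[i][0] for i in samples_plates if i in D])))
--     # create a dict to store samples on each plate
--     s = {}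
--     for i in samples_plates:
--         if samples_plates[i][0] not in s:
--             s[samples_plates[i][0]] = []
--         s[samples_plates[i][0]].append(i)
--     # check if plates only contains control samples
--     if project:
--         to_remove = []
--         for i in s:
--             contains_samples = []
--             for j in s[i]:
--                 contains_samples.append(project in j)
--             # remove plate if only controls are on the plate
--             if not any(contains_samples):
--                 to_remove.append(i)
--         for i in to_remove:
--             if i in plates:
--                 plates.remove(i)
--     return plates
-- ===== SOURCE B (Python) =====
-- def get_plates(samples_plates, D, project):
--     # plates having at least one sample with QC metrics (i.e. in D)
--     with_D = {samples_plates[k][0] for k in samples_plates if k in D}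
--     if not project:
--         return sorted(with_D)
--     # plates having at least one project sample (scanning ALL samples)
--     with_project = {samples_plates[k][0] for k in samples_plates if project in k}
--     return sorted(with_D & with_project)
-- ===== Notes on version B (the rewrite author's own statement) =====
-- stated objective: simpler
-- what changed: Replaces A's build-then-remove (grouping dict of per-plate sample lists, a to_remove list and a list.remove pass) with one set comprehension per condition and a direct set intersection before sorting.
import Mathlib
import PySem

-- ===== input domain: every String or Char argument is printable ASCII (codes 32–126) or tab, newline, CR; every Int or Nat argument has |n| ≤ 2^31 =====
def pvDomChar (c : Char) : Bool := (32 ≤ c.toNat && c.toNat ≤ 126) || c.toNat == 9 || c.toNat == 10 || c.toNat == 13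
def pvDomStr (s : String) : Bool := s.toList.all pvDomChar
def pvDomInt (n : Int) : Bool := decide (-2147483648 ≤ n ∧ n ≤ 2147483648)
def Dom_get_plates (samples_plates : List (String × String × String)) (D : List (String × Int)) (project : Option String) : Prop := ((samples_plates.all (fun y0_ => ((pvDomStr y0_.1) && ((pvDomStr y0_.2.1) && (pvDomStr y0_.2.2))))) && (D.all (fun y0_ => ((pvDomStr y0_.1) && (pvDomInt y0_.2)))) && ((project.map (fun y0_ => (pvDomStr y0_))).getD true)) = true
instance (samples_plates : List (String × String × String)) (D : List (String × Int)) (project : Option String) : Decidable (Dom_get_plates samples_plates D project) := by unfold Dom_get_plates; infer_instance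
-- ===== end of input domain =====

-- B replaces A's grouping dict + to_remove + list.remove pass by two set comprehensions and a set
-- intersection before sorting (objective: simpler). Both ports read the dict arguments through
-- PySem.Dict.ofList (Python dict semantics: unique keys, last value wins, first position kept).

-- ===== PORT A =====
def get_plates (samples_plates : List (String × String × String)) (D : List (String × Int)) (project : Option String) : List String :=
  let items := (PySem.Dict.ofList samples_plates).items
  -- plates = sorted(list(set([samples_plates[i][0] for i in samples_plates if i in D])))
  let plates := PySem.List.sorted
    (PySem.Set.ofList (items.filterMap (fun kv => if (D.map Prod.fst).contains kv.1 then some kv.2.1 else none)))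
    (fun x => x) false
  -- s = {}; for i in samples_plates: s.setdefault(plate, []).append(i)  (modify = get-or-default then append)
  let s := items.foldl (fun d kv => PySem.Dict.modify d kv.2.1 [] (fun l => l ++ [kv.1])) PySem.Dict.empty
  match project with
  | none => plates
  | some p =>
    if p = "" then plates  -- '' is falsy: `if project:` skips the filtering
    else
      -- to_remove: plates whose sample list has no name containing project
      let to_remove := s.items.foldl (fun acc pr =>
        let contains_samples := pr.2.map (fun j => PySem.Str.isIn p j)
        if contains_samples.any id then acc else acc ++ [pr.1]) []
      -- for i in to_remove: if i in plates: plates.remove(i)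
      to_remove.foldl (fun pl i => if pl.contains i then (PySem.List.remove? pl i).getD pl else pl) plates

-- ===== PORT B =====
def get_plates_alt (samples_plates : List (String × String × String)) (D : List (String × Int)) (project : Option String) : List String :=
  let items := (PySem.Dict.ofList samples_plates).items
  -- with_D = {samples_plates[k][0] for k in samples_plates if k in D}
  let withD : PySem.Set String :=
    PySem.Set.ofList (items.filterMap (fun kv => if (D.map Prod.fst).contains kv.1 then some kv.2.1 else none))
  match project with
  | none => PySem.List.sorted withD (fun x => x) false
  | some p =>
    if p = "" then PySem.List.sorted withD (fun x => x) false
    else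
      -- with_project = {samples_plates[k][0] for k in samples_plates if project in k}
      let withP : PySem.Set String :=
        PySem.Set.ofList (items.filterMap (fun kv => if PySem.Str.isIn p kv.1 then some kv.2.1 else none))
      PySem.List.sorted (PySem.Set.inter withD withP) (fun x => x) false

-- ===== PRECONDITION & SPEC =====
def Spec_get_plates (samples_plates : List (String × String × String)) (D : List (String × Int)) (project : Option String) (out : List String) : Prop := out = get_plates_alt samples_plates D project
instance (samples_plates : List (String × String × String)) (D : List (String × Int)) (project : Option String) (out : List String) : Decidable (Spec_get_plates samples_plates D project out) := by unfold Spec_get_plates; infer_instance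

-- ===== CLAIM (what is proved, stated in full; the proofs are below) =====
def Claim_equal_get_plates : Prop := ∀ (samples_plates : List (String × String × String)) (D : List (String × Int)) (project : Option String), Dom_get_plates samples_plates D project → Spec_get_plates samples_plates D project (get_plates samples_plates D project)

-- ===== LEMMAS AND PROOFS =====

-- A's removal loop (`if i in plates: plates.remove(i)`) on a duplicate-free list is a filter
lemma foldl_remove_eq_filter (rem plates : List String) (h : plates.Nodup) :
    rem.foldl (fun pl i => if pl.contains i then (PySem.List.remove? pl i).getD pl else pl) plates
      = plates.filter (fun x => decide (x ∉ rem)) := by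
  induction rem generalizing plates with
  | nil => simp
  | cons i t ih =>
    have hstep : (if plates.contains i then (PySem.List.remove? plates i).getD plates else plates)
        = plates.filter (fun x => decide (x ≠ i)) := by
      by_cases hi : i ∈ plates
      · rw [if_pos (by simpa using hi), PySem.List.remove?_eq_some_erase plates i hi]
        simpa using List.Nodup.erase_eq_filter h i
      · rw [if_neg (by simpa using hi)]
        symm
        apply List.filter_eq_self.mpr
        intro a ha
        simp only [decide_eq_true_eq]
        rintro rfl
        exact hi ha
    rw [List.foldl_cons, hstep, ih _ (h.filter _), List.filter_filter]
    congr 1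
    funext x
    by_cases hx : x = i <;> simp [hx]

lemma get_plates_eq_alt (sp : List (String × String × String)) (D : List (String × Int)) (project : Option String) :
    get_plates sp D project = get_plates_alt sp D project := by
  unfold get_plates get_plates_alt
  cases project with
  | none => rfl
  | some p =>
    by_cases hp : p = ""
    · simp [hp]
    · simp only [if_neg hp]
      set items := (PySem.Dict.ofList sp).items with hitemsdef
      set s := items.foldl (fun d kv => PySem.Dict.modify d kv.2.1 [] (fun l => l ++ [kv.1])) PySem.Dict.empty with hsdef
      set LD := items.filterMap (fun kv => if (D.map Prod.fst).contains kv.1 then some kv.2.1 else none) with hLD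
      set LP := items.filterMap (fun kv => if PySem.Str.isIn p kv.1 then some kv.2.1 else none) with hLP
      have hskeys : s.keys = PySem.Set.ofList (items.map (fun kv => kv.2.1)) := by
        rw [hsdef]
        rw [PySem.Dict.keys_foldl_modify_key items (fun kv => kv.2.1) [] (fun _ kv => fun l => l ++ [kv.1]) PySem.Dict.empty]
        rw [PySem.Dict.keys_empty, PySem.Set.update_nil_left]
      have hsknd : s.keys.Nodup := hskeys ▸ PySem.Set.nodup_ofList _
      have hmapfold : s = (items.map (fun kv => (kv.2.1, kv.1))).foldl
          (fun d (pr : String × String) => PySem.Dict.modify d pr.1 [] (fun l => l ++ [pr.2])) PySem.Dict.empty := by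
        rw [List.foldl_map]
      have hgetD : ∀ x, s.getD x [] = (items.filter (fun kv => kv.2.1 == x)).map (fun kv => kv.1) := by
        intro x
        rw [hmapfold, PySem.Dict.getD_foldl_modify_append]
        simp [List.filter_map, List.map_map, Function.comp_def]
      have hflip : (fun (acc : List String) (pr : String × List String) =>
            if (pr.2.map (fun j => PySem.Str.isIn p j)).any id then acc else acc ++ [pr.1])
          = (fun acc pr => if (!(pr.2.map (fun j => PySem.Str.isIn p j)).any id) then acc ++ [pr.1] else acc) := by
        funext acc pr
        cases hB : (pr.2.map (fun j => PySem.Str.isIn p j)).any id <;> simp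
      set to_remove := s.items.foldl (fun acc pr =>
        let contains_samples := pr.2.map (fun j => PySem.Str.isIn p j)
        if contains_samples.any id then acc else acc ++ [pr.1]) [] with htr
      have htrem : to_remove
          = (s.items.filter (fun pr => !(pr.2.map (fun j => PySem.Str.isIn p j)).any id)).map (fun pr => pr.1) := by
        rw [htr]
        simp only [hflip]
        rw [PySem.List.foldl_append_if]
        simp
      have hmem1 : ∀ x, x ∈ to_remove ↔ x ∈ s.keys ∧
          ((s.getD x []).map (fun j => PySem.Str.isIn p j)).any id = false := by
        intro x
        rw [htrem, PySem.Dict.items_eq_map_keys s hsknd [], List.filter_map, List.map_map]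
        simp only [Function.comp_def, List.mem_map, List.mem_filter, Bool.not_eq_true']
        constructor
        · rintro ⟨k, ⟨hk, hf⟩, rfl⟩; exact ⟨hk, hf⟩
        · rintro ⟨hk, hf⟩; exact ⟨x, ⟨hk, hf⟩, rfl⟩
      have hany : ∀ x, ((s.getD x []).map (fun j => PySem.Str.isIn p j)).any id = true ↔
          ∃ kv ∈ items, kv.2.1 = x ∧ PySem.Str.isIn p kv.1 = true := by
        intro x
        rw [hgetD]
        simp only [List.any_eq_true, List.mem_map, List.mem_filter, beq_iff_eq, id_eq]
        aesop
      have hLDmem : ∀ a, a ∈ LD ↔ ∃ kv ∈ items, (D.map Prod.fst).contains kv.1 = true ∧ kv.2.1 = a := by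
        intro a; rw [hLD]; simp [List.mem_filterMap]
      have hLPmem : ∀ a, a ∈ LP ↔ ∃ kv ∈ items, PySem.Str.isIn p kv.1 = true ∧ kv.2.1 = a := by
        intro a; rw [hLP]; simp [List.mem_filterMap]
      have hWkeys : ∀ a ∈ LD, a ∈ s.keys := by
        intro a ha
        rw [hskeys, PySem.Set.mem_ofList, List.mem_map]
        rcases (hLDmem a).mp ha with ⟨kv, hkv, _, hx⟩
        exact ⟨kv, hkv, hx⟩
      have hpair := PySem.List.sorted_ofList_pairwise_lt (κ := String) LD
      have hnd : (PySem.List.sorted (PySem.Set.ofList LD) (fun x => x) false).Nodup :=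
        hpair.imp (fun h => ne_of_lt h)
      rw [foldl_remove_eq_filter _ _ hnd]
      symm
      apply PySem.List.sorted_eq_of_perm_of_pairwise_lt
      · rw [List.perm_ext_iff_of_nodup (hnd.filter _)
            (PySem.Set.nodup_inter _ _ (PySem.Set.nodup_ofList _))]
        intro a
        rw [List.mem_filter, PySem.Set.mem_inter, PySem.List.mem_sorted, PySem.Set.mem_ofList,
            PySem.Set.mem_ofList]
        constructor
        · rintro ⟨ha, hnr⟩
          refine ⟨ha, ?_⟩
          simp only [decide_eq_true_eq] at hnr
          rw [hmem1] at hnr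
          push Not at hnr
          have hb := hnr (hWkeys a ha)
          rw [Bool.ne_false_iff, hany] at hb
          rcases hb with ⟨kv, hkv, hx, hin⟩
          exact (hLPmem a).mpr ⟨kv, hkv, hin, hx⟩
        · rintro ⟨ha, hP⟩
          refine ⟨ha, ?_⟩
          simp only [decide_eq_true_eq]
          rw [hmem1]
          rintro ⟨-, hf⟩
          rcases (hLPmem a).mp hP with ⟨kv, hkv, hin, hx⟩
          have := (hany a).mpr ⟨kv, hkv, hx, hin⟩
          rw [this] at hf
          cases hf
      · exact hpair.sublist List.filter_sublist

-- ===== VERDICT (by name: the statement is the Claim_ definition above) =====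
theorem get_plates_spec : Claim_equal_get_plates := by
  intro sp D project _
  exact get_plates_eq_alt sp D project
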